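-- pv_equiv track=rewrite | github.com/needscroll/zeomine | samples/sample_crawler.py | in_blacklist
-- ===== SOURCE A (Python) =====
-- def in_blacklist(item, blacklist):
--   if not blacklist:
--     return False
--   else:
--     for substr in blacklist:
--       if substr in item:
--         return True
--     return False
-- ===== SOURCE B (Python) =====
-- def in_blacklist(item, blacklist):
--     # Position-major scan: for each start offset of item, test whether some
--     # blacklist pattern begins there (no per-pattern substring search).
--     return any(item.startswith(p, i)
--                for i in range(len(item) + 1)
--                for p in blacklist)
-- ===== Notes on version B (the rewrite author's own statement) =====
-- stated objective: alternative
-- what changed: Replaces the pattern-outer loop of substring searches by a position-outer scan over item's offsets testing startswith for each pattern at that offset.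
import Mathlib
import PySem

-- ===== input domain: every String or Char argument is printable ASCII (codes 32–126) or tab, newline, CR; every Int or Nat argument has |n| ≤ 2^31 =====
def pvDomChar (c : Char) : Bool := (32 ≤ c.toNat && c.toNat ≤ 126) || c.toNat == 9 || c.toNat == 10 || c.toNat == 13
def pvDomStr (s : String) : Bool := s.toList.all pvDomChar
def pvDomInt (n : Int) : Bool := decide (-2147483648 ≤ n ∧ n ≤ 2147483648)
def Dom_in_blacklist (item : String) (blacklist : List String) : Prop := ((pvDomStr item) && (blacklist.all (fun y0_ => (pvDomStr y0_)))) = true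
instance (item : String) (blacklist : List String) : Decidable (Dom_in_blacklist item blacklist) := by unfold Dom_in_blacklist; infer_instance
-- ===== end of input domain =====

-- B replaces A's pattern-outer loop of substring searches by a position-outer
-- scan over item's offsets (alternative decomposition, same exact behaviour).


-- ===== PORT A =====
-- the 'for substr in blacklist: if substr in item: return True' loop, early return and all
def inBlacklistLoopA (item : String) : List String → Bool
  | [] => false
  | substr :: rest => if PySem.Str.isIn substr item then true else inBlacklistLoopA item rest

def in_blacklist (item : String) (blacklist : List String) : Bool :=
  if blacklist.isEmpty then false else inBlacklistLoopA item blacklist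

-- ===== PORT B =====
-- any(item.startswith(p, i) for i in range(len(item)+1) for p in blacklist);
-- item.startswith(p, i) with 0 ≤ i is exactly 'p is a prefix of item dropped i chars'
def in_blacklist_alt (item : String) (blacklist : List String) : Bool :=
  (List.range (item.length + 1)).any (fun i =>
    blacklist.any (fun p => PySem.Chars.startswith (item.toList.drop i) p.toList))

-- ===== PRECONDITION & SPEC =====
def Spec_in_blacklist (item : String) (blacklist : List String) (out : Bool) : Prop := out = in_blacklist_alt item blacklist
instance (item : String) (blacklist : List String) (out : Bool) : Decidable (Spec_in_blacklist item blacklist out) := by unfold Spec_in_blacklist; infer_instance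

-- ===== CLAIM (what is proved, stated in full; the proofs are below) =====
def Claim_equal_in_blacklist : Prop := ∀ (item : String) (blacklist : List String), Dom_in_blacklist item blacklist → Spec_in_blacklist item blacklist (in_blacklist item blacklist)

-- ===== LEMMAS AND PROOFS =====

-- A's loop is List.any of the substring test
theorem loopA_eq_any (item : String) (bl : List String) :
    inBlacklistLoopA item bl = bl.any (fun p => PySem.Str.isIn p item) := by
  induction bl with
  | nil => rfl
  | cons s rest ih =>
    simp [inBlacklistLoopA, List.any_cons, ih]

-- substring occurrence ↔ some offset in 0..length where it is a prefix
theorem isIn_eq_any_range (item : String) (p : String) :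
    PySem.Str.isIn p item =
      (List.range (item.length + 1)).any
        (fun i => PySem.Chars.startswith (item.toList.drop i) p.toList) := by
  have hlen : item.toList.length = item.length := String.length_toList
  rw [Bool.eq_iff_iff]
  simp only [List.any_eq_true, List.mem_range, PySem.Chars.startswith_iff, PySem.Str.isIn_eq]
  rw [← PySem.Chars.exists_prefix_drop_iff_isIn]
  constructor
  · rintro ⟨j, hj⟩
    by_cases h : j < item.length + 1
    · exact ⟨j, h, hj⟩
    · refine ⟨item.length, Nat.lt_succ_self _, ?_⟩
      have hnil : item.toList.drop j = [] :=
        List.drop_eq_nil_of_le (by omega)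
      have : p.toList = [] := List.prefix_nil.mp (hnil ▸ hj)
      simp [this]
  · rintro ⟨i, _, hi⟩
    exact ⟨i, hi⟩

-- ===== VERDICT (by name: the statement is the Claim_ definition above) =====
theorem in_blacklist_spec : Claim_equal_in_blacklist := by
  intro item bl _
  unfold Spec_in_blacklist in_blacklist in_blacklist_alt
  cases bl with
  | nil => simp
  | cons s rest =>
    rw [if_neg (by simp), loopA_eq_any]
    rw [Bool.eq_iff_iff]
    simp only [List.any_eq_true, List.mem_range]
    constructor
    · rintro ⟨p, hp, h⟩
      rw [isIn_eq_any_range] at h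
      simp only [List.any_eq_true, List.mem_range] at h
      obtain ⟨i, hi, h⟩ := h
      exact ⟨i, hi, p, hp, h⟩
    · rintro ⟨i, hi, p, hp, h⟩
      refine ⟨p, hp, ?_⟩
      rw [isIn_eq_any_range]
      simp only [List.any_eq_true, List.mem_range]
      exact ⟨i, hi, h⟩
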